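-- pv_equiv track=rewrite | github.com/Bible-Translation-Tools/usfm-tools | src/verifyUSFM.py | decimal_value
-- ===== SOURCE A (Python) =====
-- import unicodedata
--
-- def decimal_value(s):
--     value = 0
--     for i in range(len(s)):
--         d = unicodedata.digit(s[i], -1)
--         if d >= 0:
--             value = value * 10 + d
--         else:
--             value = 0
--             break
--     return value
-- ===== SOURCE B (Python) =====
-- import unicodedata
--
-- def decimal_value(s):
--     digits = [unicodedata.digit(ch, -1) for ch in s]
--     if any(d < 0 for d in digits):
--         return 0
--     value = 0
--     for d in digits:
--         value = value * 10 + d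
--     return value
-- ===== Notes on version B (the rewrite author's own statement) =====
-- stated objective: alternative
-- what changed: Replaced the single scan with an in-loop break/reset by a map pass building per-character digit values, a separate any-negative validation pass, and a fold accumulating the value.
import Mathlib
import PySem

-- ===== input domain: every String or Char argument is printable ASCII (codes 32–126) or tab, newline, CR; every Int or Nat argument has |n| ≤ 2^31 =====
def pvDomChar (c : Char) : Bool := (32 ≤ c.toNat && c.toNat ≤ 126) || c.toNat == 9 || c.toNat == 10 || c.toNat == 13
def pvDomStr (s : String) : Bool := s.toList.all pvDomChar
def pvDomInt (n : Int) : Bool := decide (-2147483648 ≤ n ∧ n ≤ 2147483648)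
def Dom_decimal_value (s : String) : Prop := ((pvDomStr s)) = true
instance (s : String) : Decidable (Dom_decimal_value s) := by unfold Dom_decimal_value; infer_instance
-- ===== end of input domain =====

-- B rewrites A's single scan with break/reset as a map pass, an any-negative check, and a fold (alternative decomposition).

-- ===== PORT A =====
-- unicodedata.digit(c, -1): on the ASCII domain exactly '0'-'9' have a digit value; exact there.
def pyDigit (c : Char) : Int := if '0' ≤ c ∧ c ≤ '9' then (c.toNat : Int) - 48 else -1

-- the for-loop over the characters, with the else-branch's 'value = 0; break'
def decimalLoopA : List Char → Int → Int
  | [], value => value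
  | c :: cs, value =>
    if pyDigit c ≥ 0 then decimalLoopA cs (value * 10 + pyDigit c) else 0

def decimal_value (s : String) : Int := decimalLoopA s.toList 0

-- ===== PORT B =====
def decimal_value_alt (s : String) : Int :=
  let digits := s.toList.map pyDigit
  if digits.any (fun d => d < 0) then 0
  else digits.foldl (fun value d => value * 10 + d) 0

-- ===== PRECONDITION & SPEC =====
def Spec_decimal_value (s : String) (out : Int) : Prop := out = decimal_value_alt s
instance (s : String) (out : Int) : Decidable (Spec_decimal_value s out) := by unfold Spec_decimal_value; infer_instance

-- ===== CLAIM (what is proved, stated in full; the proofs are below) =====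
def Claim_equal_decimal_value : Prop := ∀ (s : String), Dom_decimal_value s → Spec_decimal_value s (decimal_value s)

-- ===== LEMMAS AND PROOFS =====
theorem decimalLoopA_eq (l : List Char) (v : Int) :
    decimalLoopA l v =
      if (l.map pyDigit).any (fun d => d < 0) then 0
      else (l.map pyDigit).foldl (fun value d => value * 10 + d) v := by
  induction l generalizing v with
  | nil => simp [decimalLoopA]
  | cons c cs ih =>
    simp only [decimalLoopA, List.map_cons, List.any_cons, List.foldl_cons]
    by_cases h : pyDigit c ≥ 0
    · rw [if_pos h, ih]
      have : ¬ (pyDigit c < 0) := not_lt.mpr h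
      simp [this]
    · rw [if_neg h]
      have : pyDigit c < 0 := lt_of_not_ge h
      simp [this]

-- ===== VERDICT (by name: the statement is the Claim_ definition above) =====
theorem decimal_value_spec : Claim_equal_decimal_value := by
  intro s _
  unfold Spec_decimal_value decimal_value decimal_value_alt
  simpa using decimalLoopA_eq s.toList 0
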